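-- pv_equiv track=rewrite | github.com/tencent-quantum-lab/tensorcircuit | tensorcircuit/quantum.py | xyz2ps
-- ===== SOURCE A (Python) =====
-- from typing import (
--     Any,
--     Callable,
--     Collection,
--     Dict,
--     List,
--     Optional,
--     Sequence,
--     Set,
--     Tuple,
--     Union,
-- )
--
-- def xyz2ps(xyz: Dict[str, List[int]], n: Optional[int] = None) -> List[int]:
--     """
--     xyz dict to pauli string list
--
--     :param xyz: _description_
--     :type xyz: Dict[str, List[int]]
--     :param n: _description_, defaults to None
--     :type n: Optional[int], optional
--     :return: _description_
--     :rtype: List[int]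
--     """
--     if n is None:
--         n = max(xyz.get("x", []) + xyz.get("y", []) + xyz.get("z", [])) + 1
--     ps = [0 for _ in range(n)]
--     for i in range(n):
--         if i in xyz.get("x", []):
--             ps[i] = 1
--         elif i in xyz.get("y", []):
--             ps[i] = 2
--         elif i in xyz.get("z", []):
--             ps[i] = 3
--     return ps
-- ===== SOURCE B (Python) =====
-- def xyz2ps(xyz, n=None):
--     if n is None:
--         n = max(xyz.get("x", []) + xyz.get("y", []) + xyz.get("z", [])) + 1
--     ps = [0] * n
--     for idx in xyz.get("z", []):
--         if 0 <= idx < n: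
--             ps[idx] = 3
--     for idx in xyz.get("y", []):
--         if 0 <= idx < n:
--             ps[idx] = 2
--     for idx in xyz.get("x", []):
--         if 0 <= idx < n:
--             ps[idx] = 1
--     return ps
-- ===== Notes on version B (the rewrite author's own statement) =====
-- stated objective: faster
-- what changed: A scans every position 0..n-1 and tests membership in the x/y/z lists per position; B builds [0]*n once and scatters codes per index (z, then y, then x so x wins), guarding 0 <= idx < n.
import Mathlib
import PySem

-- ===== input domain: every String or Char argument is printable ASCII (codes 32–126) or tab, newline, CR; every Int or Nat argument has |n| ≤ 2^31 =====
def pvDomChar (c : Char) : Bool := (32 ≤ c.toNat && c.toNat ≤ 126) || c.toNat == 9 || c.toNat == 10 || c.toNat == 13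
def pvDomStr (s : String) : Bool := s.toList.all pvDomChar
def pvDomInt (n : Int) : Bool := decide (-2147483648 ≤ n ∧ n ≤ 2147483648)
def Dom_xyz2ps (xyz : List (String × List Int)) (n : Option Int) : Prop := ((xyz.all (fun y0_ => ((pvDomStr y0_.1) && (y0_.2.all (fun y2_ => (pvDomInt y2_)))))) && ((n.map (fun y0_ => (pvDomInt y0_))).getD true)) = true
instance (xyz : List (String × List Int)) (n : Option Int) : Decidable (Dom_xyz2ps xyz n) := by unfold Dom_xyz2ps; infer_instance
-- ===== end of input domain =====

-- B replaces A's per-position membership scans with per-index scatter writes (z, then y, then x).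
-- ===== PORT A =====
def pvGetL (xyz : List (String × List Int)) (k : String) : List Int :=
  (xyz.lookup k).getD []

def xyz2ps (xyz : List (String × List Int)) (n : Option Int) : List Int :=
  let nv : Int := match n with
    | some v => v
    | none => (PySem.List.max? (pvGetL xyz "x" ++ pvGetL xyz "y" ++ pvGetL xyz "z") (fun x => x)).getD 0 + 1
  let ps : List Int := List.replicate nv.toNat 0
  (PySem.List.pyRange 0 nv 1).foldl (fun acc i =>
    if i ∈ pvGetL xyz "x" then acc.set i.toNat 1
    else if i ∈ pvGetL xyz "y" then acc.set i.toNat 2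
    else if i ∈ pvGetL xyz "z" then acc.set i.toNat 3
    else acc) ps

-- ===== PORT B =====
def pvScatter (nv : Int) (c : Int) (acc : List Int) (idxs : List Int) : List Int :=
  idxs.foldl (fun a idx => if 0 ≤ idx ∧ idx < nv then a.set idx.toNat c else a) acc

def xyz2ps_alt (xyz : List (String × List Int)) (n : Option Int) : List Int :=
  let nv : Int := match n with
    | some v => v
    | none => (PySem.List.max? (pvGetL xyz "x" ++ pvGetL xyz "y" ++ pvGetL xyz "z") (fun x => x)).getD 0 + 1
  let ps : List Int := List.replicate nv.toNat 0
  let ps := pvScatter nv 3 ps (pvGetL xyz "z")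
  let ps := pvScatter nv 2 ps (pvGetL xyz "y")
  pvScatter nv 1 ps (pvGetL xyz "x")

-- ===== PRECONDITION & SPEC =====
-- Pre_ excludes only the inputs where Python A raises: n is None and all three index
-- lists are empty ('max' of an empty sequence is a ValueError).
def Pre_xyz2ps (xyz : List (String × List Int)) (n : Option Int) : Prop :=
  n = none → pvGetL xyz "x" ++ pvGetL xyz "y" ++ pvGetL xyz "z" ≠ []
instance (xyz : List (String × List Int)) (n : Option Int) : Decidable (Pre_xyz2ps xyz n) := by
  unfold Pre_xyz2ps; infer_instance

def pvWitness_xyz2ps : (List (String × List Int)) × Option Int :=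
  ([("x", [0, 2]), ("z", [1])], none)

def Spec_xyz2ps (xyz : List (String × List Int)) (n : Option Int) (out : List Int) : Prop := out = xyz2ps_alt xyz n
instance (xyz : List (String × List Int)) (n : Option Int) (out : List Int) : Decidable (Spec_xyz2ps xyz n out) := by unfold Spec_xyz2ps; infer_instance

-- ===== CLAIM (what is proved, stated in full; the proofs are below) =====
def Claim_equal_xyz2ps : Prop := ∀ (xyz : List (String × List Int)) (n : Option Int), Dom_xyz2ps xyz n → Pre_xyz2ps xyz n → Spec_xyz2ps xyz n (xyz2ps xyz n)

-- ===== LEMMAS AND PROOFS =====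

theorem length_pvScatter (nv c : Int) (idxs acc : List Int) :
    (pvScatter nv c acc idxs).length = acc.length := by
  induction idxs generalizing acc with
  | nil => rfl
  | cons i t ih =>
    simp only [pvScatter, List.foldl_cons] at *
    split
    · rw [ih]; simp
    · exact ih acc

theorem getElem?_pvScatter (nv c : Int) (idxs : List Int) :
    ∀ (acc : List Int), acc.length = nv.toNat → ∀ (j : Nat), j < nv.toNat →
    (pvScatter nv c acc idxs)[j]? = if (j : Int) ∈ idxs then some c else acc[j]? := by
  induction idxs with
  | nil => intro acc h j hj; simp [pvScatter]
  | cons i t ih =>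
    intro acc h j hj
    simp only [pvScatter, List.foldl_cons] at *
    by_cases hg : 0 ≤ i ∧ i < nv
    · rw [if_pos hg, ih (acc.set i.toNat c) (by simp [h]) j hj]
      by_cases hm : (j : Int) ∈ t
      · rw [if_pos hm, if_pos (List.mem_cons.mpr (Or.inr hm))]
      · rw [if_neg hm, List.getElem?_set_of_lt c acc (by omega)]
        simp only [List.mem_cons]
        by_cases hij : i = (j : Int)
        · rw [if_pos (by omega), if_pos (Or.inl hij.symm)]
        · rw [if_neg (by omega), if_neg (by rintro (h' | h'); exacts [hij h'.symm, hm h'])]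
    · rw [if_neg hg, ih acc h j hj]
      simp only [List.mem_cons]
      have hij : i ≠ (j : Int) := by intro e; exact hg ⟨by omega, by omega⟩
      by_cases hm : (j : Int) ∈ t
      · rw [if_pos hm, if_pos (Or.inr hm)]
      · rw [if_neg hm, if_neg (by rintro (h' | h'); exacts [hij h'.symm, hm h'])]

-- element value A's loop produces at position j
def pvF (gx gy gz : List Int) (j : Int) : Int :=
  if j ∈ gx then 1 else if j ∈ gy then 2 else if j ∈ gz then 3 else 0

theorem A_fold (gx gy gz : List Int) (nv : Int) :
    ∀ (k : Nat) (a : Int), 0 ≤ a → (nv - a).toNat = k →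
    ∀ (acc : List Int), acc.length = nv.toNat →
    (∀ j : Nat, j < nv.toNat → a ≤ (j : Int) → acc[j]? = some 0) →
    ∀ (j : Nat), j < nv.toNat →
      ((PySem.List.pyRange a nv 1).foldl (fun acc i =>
        if i ∈ gx then acc.set i.toNat 1
        else if i ∈ gy then acc.set i.toNat 2
        else if i ∈ gz then acc.set i.toNat 3
        else acc) acc)[j]? =
        if (j : Int) < a then acc[j]? else some (pvF gx gy gz j) := by
  intro k
  induction k with
  | zero =>
    intro a ha hk acc hlen h0 j hj
    have hba : nv ≤ a := by omega
    rw [PySem.List.pyRange_one_eq_nil hba]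
    simp only [List.foldl_nil]
    rw [if_pos (by omega)]
  | succ k ih =>
    intro a ha hk acc hlen h0 j hj
    have hab : a < nv := by omega
    rw [PySem.List.pyRange_one_cons hab]
    simp only [List.foldl_cons]
    set acc' : List Int :=
      (if a ∈ gx then acc.set a.toNat 1
       else if a ∈ gy then acc.set a.toNat 2
       else if a ∈ gz then acc.set a.toNat 3
       else acc) with hacc'
    have hlen' : acc'.length = nv.toNat := by
      rw [hacc']; split_ifs <;> simp [hlen]
    have hget' : ∀ (j : Nat), j < nv.toNat →
        acc'[j]? = if (j : Int) = a then some (pvF gx gy gz a) else acc[j]? := by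
      intro j hj
      have hja : a.toNat < acc.length := by omega
      by_cases hje : (j : Int) = a
      · have haj : a.toNat = j := by omega
        rw [hacc', if_pos hje]
        unfold pvF
        split_ifs with h1 h2 h3
        · rw [List.getElem?_set_of_lt _ _ (by omega), if_pos haj]
        · rw [List.getElem?_set_of_lt _ _ (by omega), if_pos haj]
        · rw [List.getElem?_set_of_lt _ _ (by omega), if_pos haj]
        · rw [h0 j hj (by omega)]
      · have haj : a.toNat ≠ j := by omega
        rw [hacc', if_neg hje]
        split_ifs <;> try rw [List.getElem?_set_of_lt _ _ (by omega), if_neg haj]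
        rfl
    have h0' : ∀ j : Nat, j < nv.toNat → a + 1 ≤ (j : Int) → acc'[j]? = some 0 := by
      intro j hj hja
      rw [hget' j hj, if_neg (by omega)]
      exact h0 j hj (by omega)
    rw [ih (a + 1) (by omega) (by omega) acc' hlen' h0' j hj]
    by_cases hja : (j : Int) < a
    · rw [if_pos (by omega), if_pos hja, hget' j hj, if_neg (by omega)]
    · by_cases hje : (j : Int) = a
      · rw [if_pos (by omega), if_neg hja, hget' j hj, if_pos hje, hje]
      · rw [if_neg (by omega), if_neg hja]

theorem core (gx gy gz : List Int) (nv : Int) :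
    ((PySem.List.pyRange 0 nv 1).foldl (fun acc i =>
        if i ∈ gx then acc.set i.toNat 1
        else if i ∈ gy then acc.set i.toNat 2
        else if i ∈ gz then acc.set i.toNat 3
        else acc) (List.replicate nv.toNat 0)) =
    pvScatter nv 1 (pvScatter nv 2 (pvScatter nv 3 (List.replicate nv.toNat 0) gz) gy) gx := by
  have hrep : (List.replicate nv.toNat (0 : Int)).length = nv.toNat := by simp
  have hZ : (pvScatter nv 3 (List.replicate nv.toNat 0) gz).length = nv.toNat := by
    rw [length_pvScatter]; simp
  have hY : (pvScatter nv 2 (pvScatter nv 3 (List.replicate nv.toNat 0) gz) gy).length = nv.toNat := by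
    rw [length_pvScatter]; exact hZ
  have hAlen : ∀ (acc : List Int), ((PySem.List.pyRange 0 nv 1).foldl (fun acc i =>
        if i ∈ gx then acc.set i.toNat 1
        else if i ∈ gy then acc.set i.toNat 2
        else if i ∈ gz then acc.set i.toNat 3
        else acc) acc).length = acc.length := by
    intro acc
    induction PySem.List.pyRange 0 nv 1 generalizing acc with
    | nil => rfl
    | cons i t ih =>
      simp only [List.foldl_cons]
      split_ifs <;> rw [ih] <;> simp
  apply List.ext_getElem?
  intro j
  by_cases hj : j < nv.toNat
  · rw [A_fold gx gy gz nv (nv - 0).toNat 0 (by omega) rfl (List.replicate nv.toNat 0) hrep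
        (by intro j' hj' _; simp [hj']) j hj]
    rw [if_neg (by omega)]
    rw [getElem?_pvScatter nv 1 gx _ hY j hj]
    rw [getElem?_pvScatter nv 2 gy _ hZ j hj]
    rw [getElem?_pvScatter nv 3 gz _ hrep j hj]
    unfold pvF
    split_ifs <;> simp [hj]
  · rw [List.getElem?_eq_none (by rw [hAlen]; omega),
        List.getElem?_eq_none (by rw [length_pvScatter, hY]; omega)]

-- ===== VERDICT (by name: the statement is the Claim_ definition above) =====
theorem xyz2ps_spec : Claim_equal_xyz2ps := by
  intro xyz n _ _
  unfold Spec_xyz2ps xyz2ps xyz2ps_alt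
  exact core (pvGetL xyz "x") (pvGetL xyz "y") (pvGetL xyz "z") _
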